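-- pv_equiv track=rewrite | github.com/toddwbucy/HADES | core/analyzers/rust_symbol_extractor.py | _collect_use_statements
-- ===== SOURCE A (Python) =====
-- def _collect_use_statements(
--     lines: list[str],
-- ) -> list[tuple[int, list[tuple[int, str]]]]:
--     """Collect complete ``use`` statements, joining continuation lines.
--
--     Rust ``use`` statements may span multiple lines::
--
--         use std::{
--             io::Read,
--             fmt::Display,
--         };
--
--     Returns a list of ``(start_line_no, [(line_no, raw_line), ...])``.
--     Each entry is one complete ``use ...;`` statement with all its
--     contributing source lines.
--     """
--     result: list[tuple[int, list[tuple[int, str]]]] = []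
--     current: list[tuple[int, str]] | None = None
--     start_line = 0
--
--     for line_no, line in enumerate(lines):
--         stripped = line.strip()
--
--         if current is not None:
--             # Continuation of a multiline use statement
--             current.append((line_no, line))
--             if ";" in stripped:
--                 result.append((start_line, current))
--                 current = None
--             continue
--
--         if not stripped.startswith("use "):
--             continue
--
--         if ";" in stripped:
--             # Single-line use statement (most common case)
--             result.append((line_no, [(line_no, line)]))
--         else:
--             # Multiline use statement — starts here, continues until ";"
--             current = [(line_no, line)]
--             start_line = line_no
--
--     # Unterminated use statement at EOF — include as-is so partial
--     # parsing can still extract what it can.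
--     if current is not None:
--         result.append((start_line, current))
--
--     return result
-- ===== SOURCE B (Python) =====
-- def _collect_use_statements(
--     lines: list[str],
-- ) -> list[tuple[int, list[tuple[int, str]]]]:
--     """Index-driven scan: outer loop over statements, inner loop over
--     continuation lines of one multiline ``use`` statement."""
--     result: list[tuple[int, list[tuple[int, str]]]] = []
--     n = len(lines)
--     i = 0
--     while i < n:
--         stripped = lines[i].strip()
--         if not stripped.startswith("use "):
--             i += 1
--             continue
--         if ";" in stripped:
--             result.append((i, [(i, lines[i])]))
--             i += 1
--             continue
--         # multiline: collect until a line containing ';' (or EOF)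
--         start = i
--         group = [(i, lines[i])]
--         j = i + 1
--         while j < n:
--             group.append((j, lines[j]))
--             if ";" in lines[j].strip():
--                 break
--             j += 1
--         result.append((start, group))
--         i = j + 1
--     return result
-- ===== Notes on version B (the rewrite author's own statement) =====
-- stated objective: alternative
-- what changed: Replaced A's single pass carrying a current/start_line flag state with an index-driven outer loop over statements plus an inner loop that collects the continuation lines of one multiline use statement.
import Mathlib
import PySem

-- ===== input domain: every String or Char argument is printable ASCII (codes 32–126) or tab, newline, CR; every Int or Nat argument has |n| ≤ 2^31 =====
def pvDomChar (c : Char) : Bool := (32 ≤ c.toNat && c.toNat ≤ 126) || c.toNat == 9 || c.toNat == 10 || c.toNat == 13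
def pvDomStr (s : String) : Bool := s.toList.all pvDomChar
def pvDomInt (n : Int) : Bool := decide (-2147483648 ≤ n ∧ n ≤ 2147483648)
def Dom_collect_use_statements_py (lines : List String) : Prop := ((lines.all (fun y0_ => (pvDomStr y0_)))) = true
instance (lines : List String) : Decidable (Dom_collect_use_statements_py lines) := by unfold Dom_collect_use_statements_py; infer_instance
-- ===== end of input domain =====

-- B replaces A's carried-flag single pass by an index-driven outer loop over statements
-- with an inner loop over continuation lines; objective: alternative decomposition (same cost).

-- ===== PORT A =====
-- A's for-loop carrying (current, start_line); result emitted in append order.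
def pvAGo (i : Int) (cur : Option (List (Int × String))) (start : Int) :
    List String → List (Int × (List (Int × String)))
  | [] =>
    -- trailing 'if current is not None: result.append((start_line, current))'
    match cur with
    | some c => [(start, c)]
    | none => []
  | l :: rest =>
    let stripped := PySem.Str.strip l
    match cur with
    | some c =>
      let c' := c ++ [(i, l)]
      if PySem.Str.isIn ";" stripped then (start, c') :: pvAGo (i + 1) none start rest
      else pvAGo (i + 1) (some c') start rest
    | none =>
      if ¬ (PySem.Str.startswith stripped "use " = true) then pvAGo (i + 1) none start rest
      else if PySem.Str.isIn ";" stripped then (i, [(i, l)]) :: pvAGo (i + 1) none start rest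
      else pvAGo (i + 1) (some [(i, l)]) i rest

def collect_use_statements_py (lines : List String) : List (Int × (List (Int × String))) :=
  pvAGo 0 none 0 lines

-- ===== PORT B =====
-- inner while loop: collect continuation lines until one containing ';' (or EOF);
-- returns (group lines collected, next index i = j + 1, remaining lines).
def pvBInner (j : Int) : List String → (List (Int × String)) × Int × List String
  | [] => ([], j, [])
  | l :: rest =>
    if PySem.Str.isIn ";" (PySem.Str.strip l) then ([(j, l)], j + 1, rest)
    else
      let t := pvBInner (j + 1) rest
      ((j, l) :: t.1, t.2.1, t.2.2)

theorem pvBInner_len (j : Int) (ls : List String) :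
    (pvBInner j ls).2.2.length ≤ ls.length := by
  induction ls generalizing j with
  | nil => simp [pvBInner]
  | cons l rest ih =>
    simp only [pvBInner]
    split
    · simp
    · exact Nat.le_succ_of_le (ih (j + 1))

-- outer while loop over statements
def pvBGo (i : Int) (ls : List String) : List (Int × (List (Int × String))) :=
  match ls with
  | [] => []
  | l :: rest =>
    let stripped := PySem.Str.strip l
    if ¬ (PySem.Str.startswith stripped "use " = true) then pvBGo (i + 1) rest
    else if PySem.Str.isIn ";" stripped then (i, [(i, l)]) :: pvBGo (i + 1) rest
    else
      let t := pvBInner (i + 1) rest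
      (i, (i, l) :: t.1) :: pvBGo t.2.1 t.2.2
termination_by ls.length
decreasing_by
  all_goals simp
  all_goals first
    | omega
    | exact pvBInner_len (i + 1) rest

def collect_use_statements_py_alt (lines : List String) : List (Int × (List (Int × String))) :=
  pvBGo 0 lines

-- ===== PRECONDITION & SPEC =====
def Spec_collect_use_statements_py (lines : List String) (out : List (Int × (List (Int × String)))) : Prop := out = collect_use_statements_py_alt lines
instance (lines : List String) (out : List (Int × (List (Int × String)))) : Decidable (Spec_collect_use_statements_py lines out) := by unfold Spec_collect_use_statements_py; infer_instance

-- ===== CLAIM (what is proved, stated in full; the proofs are below) =====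
def Claim_equal_collect_use_statements_py : Prop := ∀ (lines : List String), Dom_collect_use_statements_py lines → Spec_collect_use_statements_py lines (collect_use_statements_py lines)

-- ===== LEMMAS AND PROOFS =====
theorem pvAGo_eq_pvBGo (ls : List String) :
    (∀ i start, pvAGo i none start ls = pvBGo i ls) ∧
    (∀ i c start, pvAGo i (some c) start ls =
      (start, c ++ (pvBInner i ls).1) :: pvBGo (pvBInner i ls).2.1 (pvBInner i ls).2.2) := by
  induction ls with
  | nil =>
    constructor
    · intro i start; simp [pvAGo, pvBGo]
    · intro i c start; simp [pvAGo, pvBInner, pvBGo]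
  | cons l rest ih =>
    obtain ⟨ih1, ih2⟩ := ih
    constructor
    · intro i start
      simp only [pvAGo, pvBGo]
      by_cases hu : PySem.Chars.startswith (PySem.Chars.strip l.toList) ['u', 's', 'e', ' '] = true
      · by_cases hs : PySem.Chars.isIn [';'] (PySem.Chars.strip l.toList) = true
        · simp [hu, hs, ih1]
        · simp [hu, hs, ih2]
      · simp [hu, ih1]
    · intro i c start
      simp only [pvAGo, pvBInner]
      by_cases hs : PySem.Chars.isIn [';'] (PySem.Chars.strip l.toList) = true
      · simp [hs, ih1]
      · simp [hs, ih2]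

-- ===== VERDICT (by name: the statement is the Claim_ definition above) =====
theorem collect_use_statements_py_spec : Claim_equal_collect_use_statements_py := by
  intro lines _
  unfold Spec_collect_use_statements_py collect_use_statements_py collect_use_statements_py_alt
  exact (pvAGo_eq_pvBGo lines).1 0 0
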